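-- pv_equiv track=rewrite | github.com/lefoulkrod/computron_9000 | sdk/context/_strategy.py | _count_kept_by_assistant_groups
-- ===== SOURCE A (Python) =====
-- def _count_kept_by_assistant_groups(
--     messages: list[dict],
--     keep_groups: int,
-- ) -> int:
--     """Count how many messages from the tail to keep based on assistant groups.
--
--     Walks backward through *messages* counting assistant messages (with or
--     without tool calls). When *keep_groups* assistant messages have been
--     found, the boundary is set right before the earliest one found. Any
--     non-assistant messages (user messages, tool results) that fall between
--     or after the kept assistant messages are included automatically.
--
--     Returns the number of raw messages to keep from the end.
--     """
--     if keep_groups <= 0 or not messages: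
--         return 0
--
--     assistant_count = 0
--     boundary = len(messages)
--
--     for i in range(len(messages) - 1, -1, -1):
--         msg = messages[i]
--         if msg.get("role") == "assistant":
--             assistant_count += 1
--             boundary = i
--             if assistant_count >= keep_groups:
--                 break
--
--     if assistant_count == 0:
--         return 0
--
--     return len(messages) - boundary
-- ===== SOURCE B (Python) =====
-- def _count_kept_by_assistant_groups(
--     messages: list[dict],
--     keep_groups: int,
-- ) -> int:
--     """Forward pass: collect assistant indices, then pick the boundary by arithmetic."""
--     if keep_groups <= 0 or not messages:
--         return 0
--     idx = [i for i in range(len(messages)) if messages[i].get("role") == "assistant"]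
--     if not idx:
--         return 0
--     boundary = idx[max(0, len(idx) - keep_groups)]
--     return len(messages) - boundary
-- ===== Notes on version B (the rewrite author's own statement) =====
-- stated objective: simpler
-- what changed: Replaces the backward early-exit scan with a mutable count/boundary state by a single forward comprehension collecting assistant indices plus an arithmetic selection idx[max(0, len(idx)-keep_groups)].
import Mathlib
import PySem

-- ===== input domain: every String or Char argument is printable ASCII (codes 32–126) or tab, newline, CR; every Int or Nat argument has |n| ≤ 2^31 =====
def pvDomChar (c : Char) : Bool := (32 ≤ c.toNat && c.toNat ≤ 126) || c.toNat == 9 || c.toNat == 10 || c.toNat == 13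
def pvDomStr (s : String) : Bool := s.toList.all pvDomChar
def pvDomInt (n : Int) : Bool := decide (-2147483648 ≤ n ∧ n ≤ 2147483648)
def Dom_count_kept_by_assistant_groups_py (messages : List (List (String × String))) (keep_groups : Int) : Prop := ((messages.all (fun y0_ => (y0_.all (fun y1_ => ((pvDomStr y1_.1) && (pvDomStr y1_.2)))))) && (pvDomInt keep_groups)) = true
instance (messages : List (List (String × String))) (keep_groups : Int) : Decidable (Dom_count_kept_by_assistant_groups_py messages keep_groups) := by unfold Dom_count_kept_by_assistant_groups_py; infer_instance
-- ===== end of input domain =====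

-- B replaces A's backward early-exit scan with mutable count/boundary state by a single
-- forward index comprehension plus an arithmetic selection (objective: simpler).

-- ===== PORT A =====
-- msg.get("role") == "assistant": first-match lookup in the association list (exact:
-- dict.get gives None on a missing key, and None == "assistant" is False)
def pvRole (msg : List (String × String)) : Bool :=
  match msg.find? (fun p => p.1 == "role") with
  | some p => p.2 == "assistant"
  | none => false

-- A's backward for-loop: index i descending, state (assistant_count, boundary),
-- early exit (break) once assistant_count reaches keep_groups; messages[i] is in range,
-- so list indexing is ported as getD
def pvALoop (msgs : List (List (String × String))) (kg : Int) : Nat → Int × Nat → Int × Nat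
  | 0, st =>
      if pvRole (msgs.getD 0 []) then (st.1 + 1, 0) else st
  | i+1, st =>
      if pvRole (msgs.getD (i+1) []) then
        let st' := (st.1 + 1, i+1)
        if st'.1 ≥ kg then st' else pvALoop msgs kg i st'
      else pvALoop msgs kg i st

def count_kept_by_assistant_groups_py (messages : List (List (String × String))) (keep_groups : Int) : Int :=
  if keep_groups ≤ 0 || messages.isEmpty then 0
  else
    let st := pvALoop messages keep_groups (messages.length - 1) (0, messages.length)
    if st.1 = 0 then 0
    else (messages.length : Int) - (st.2 : Int)

-- ===== PORT B =====
def count_kept_by_assistant_groups_py_alt (messages : List (List (String × String))) (keep_groups : Int) : Int :=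
  if keep_groups ≤ 0 || messages.isEmpty then 0
  else
    -- idx = [i for i in range(len(messages)) if messages[i].get("role") == "assistant"]
    let idx := (List.range messages.length).filter (fun i => pvRole (messages.getD i []))
    if idx.isEmpty then 0
    else
      -- idx[max(0, len(idx) - keep_groups)]; the index is always in range here
      let boundary := idx.getD (max 0 ((idx.length : Int) - keep_groups)).toNat 0
      (messages.length : Int) - (boundary : Int)

-- ===== PRECONDITION & SPEC =====
def Spec_count_kept_by_assistant_groups_py (messages : List (List (String × String))) (keep_groups : Int) (out : Int) : Prop := out = count_kept_by_assistant_groups_py_alt messages keep_groups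
instance (messages : List (List (String × String))) (keep_groups : Int) (out : Int) : Decidable (Spec_count_kept_by_assistant_groups_py messages keep_groups out) := by unfold Spec_count_kept_by_assistant_groups_py; infer_instance

-- ===== CLAIM (what is proved, stated in full; the proofs are below) =====
def Claim_equal_count_kept_by_assistant_groups_py : Prop := ∀ (messages : List (List (String × String))) (keep_groups : Int), Dom_count_kept_by_assistant_groups_py messages keep_groups → Spec_count_kept_by_assistant_groups_py messages keep_groups (count_kept_by_assistant_groups_py messages keep_groups)

-- ===== LEMMAS AND PROOFS =====

-- assistant indices in [0..i], in DESCENDING order (the order A's backward scan meets them)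
def pvDL (msgs : List (List (String × String))) : Nat → List Nat
  | 0 => if pvRole (msgs.getD 0 []) then [0] else []
  | i+1 => (if pvRole (msgs.getD (i+1) []) then [i+1] else []) ++ pvDL msgs i

-- characterisation of A's backward loop: it counts min(keep_groups - c, #assistants ≤ i)
-- further assistants and ends with the boundary at the last one so counted
theorem pvALoop_spec (msgs : List (List (String × String))) (kg : Int) :
    ∀ (i : Nat) (c : Int) (b : Nat), c < kg →
      pvALoop msgs kg i (c, b) =
        (c + ((min (kg - c).toNat (pvDL msgs i).length : Nat) : Int),
         if min (kg - c).toNat (pvDL msgs i).length = 0 then b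
         else (pvDL msgs i).getD (min (kg - c).toNat (pvDL msgs i).length - 1) 0) := by
  intro i
  induction i with
  | zero =>
    intro c b hc
    rw [pvALoop, pvDL]
    by_cases h : pvRole (msgs.getD 0 []) = true
    · rw [if_pos h, if_pos h]
      have h1 : min (kg - c).toNat ([0] : List Nat).length = 1 := by
        simp only [List.length_singleton]; omega
      rw [h1]
      refine Prod.ext ?_ ?_
      · simp
      · simp
    · rw [if_neg h, if_neg h]
      simp
  | succ i ih =>
    intro c b hc
    rw [pvALoop, pvDL]
    by_cases h : pvRole (msgs.getD (i+1) []) = true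
    · rw [if_pos h, if_pos h]
      simp only [List.singleton_append, List.length_cons]
      by_cases hbr : (c + 1 : Int) ≥ kg
      · rw [if_pos hbr]
        have h1 : min (kg - c).toNat ((pvDL msgs i).length + 1) = 1 := by omega
        rw [h1]
        refine Prod.ext ?_ ?_
        · simp
        · simp
      · rw [if_neg hbr]
        rw [ih (c+1) (i+1) (by omega)]
        have hmin : min (kg - c).toNat ((pvDL msgs i).length + 1)
            = min (kg - (c+1)).toNat (pvDL msgs i).length + 1 := by omega
        rw [hmin]
        refine Prod.ext ?_ ?_
        · push_cast; ring
        · rw [if_neg (Nat.succ_ne_zero _)]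
          by_cases hm : min (kg - (c+1)).toNat (pvDL msgs i).length = 0
          · rw [hm]; simp
          · obtain ⟨m', hm'⟩ : ∃ m', min (kg - (c+1)).toNat (pvDL msgs i).length = m' + 1 :=
              ⟨min (kg - (c+1)).toNat (pvDL msgs i).length - 1, by omega⟩
            rw [hm']
            rw [if_neg (Nat.succ_ne_zero _)]
            simp
    · rw [if_neg h, if_neg h]
      rw [ih c b hc]
      simp

-- B's forward index comprehension is the reverse of the descending list
theorem pvDL_reverse (msgs : List (List (String × String))) :
    ∀ i : Nat, (List.range (i+1)).filter (fun j => pvRole (msgs.getD j [])) = (pvDL msgs i).reverse := by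
  intro i
  induction i with
  | zero =>
    rw [pvDL, List.range_one]
    by_cases h : pvRole (msgs.getD 0 []) = true
    · rw [if_pos h]; simp only [List.filter_singleton, h]; simp
    · rw [if_neg h]
      have hf : pvRole (msgs.getD 0 []) = false := by simpa using h
      simp only [List.filter_singleton, hf]; simp
  | succ i ih =>
    rw [pvDL, List.range_succ, List.filter_append, ih]
    by_cases h : pvRole (msgs.getD (i+1) []) = true
    · rw [if_pos h]; simp only [List.filter_singleton, h]; simp
    · rw [if_neg h]
      have hf : pvRole (msgs.getD (i+1) []) = false := by simpa using h
      simp only [List.filter_singleton, hf]; simp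

theorem pvDL_getD_rev (l : List Nat) (j : Nat) (hj : j < l.length) :
    l.reverse.getD (l.length - 1 - j) 0 = l.getD j 0 := by
  have h1 : l.length - 1 - j < l.reverse.length := by simp; omega
  rw [List.getD_eq_getElem l.reverse 0 h1, List.getD_eq_getElem l 0 hj]
  rw [List.getElem_reverse]
  congr 1
  omega

-- ===== VERDICT (by name: the statement is the Claim_ definition above) =====
theorem count_kept_by_assistant_groups_py_spec : Claim_equal_count_kept_by_assistant_groups_py := by
  intro msgs kg _
  unfold Spec_count_kept_by_assistant_groups_py
  unfold count_kept_by_assistant_groups_py count_kept_by_assistant_groups_py_alt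
  by_cases hkg : kg ≤ 0
  · simp [hkg]
  by_cases hmt : msgs.isEmpty
  · simp [hmt]
  simp only [hkg, hmt, Bool.or_self, decide_false, Bool.false_eq_true, if_false]
  obtain ⟨i, hi⟩ : ∃ i, msgs.length = i + 1 := by
    cases msgs with
    | nil => simp at hmt
    | cons a l => exact ⟨l.length, by simp⟩
  have hloop := pvALoop_spec msgs kg i 0 msgs.length (by omega)
  have hfil := pvDL_reverse msgs i
  rw [hi] at hloop ⊢
  simp only [Nat.add_sub_cancel]
  rw [hloop, hfil]
  have hkg0 : (kg - 0).toNat = kg.toNat := by omega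
  rw [hkg0]
  by_cases hz : min kg.toNat (pvDL msgs i).length = 0
  · have hk0 : (pvDL msgs i).length = 0 := by omega
    have hdl0 : pvDL msgs i = [] := List.eq_nil_of_length_eq_zero hk0
    rw [hz, hdl0]
    simp
  · have hkpos : 0 < (pvDL msgs i).length := by omega
    have hne : ¬ ((0 : Int) + ((min kg.toNat (pvDL msgs i).length : Nat) : Int) = 0) := by
      have : 0 < min kg.toNat (pvDL msgs i).length := Nat.pos_of_ne_zero hz
      omega
    rw [if_neg hz, if_neg hne]
    have hiem : (pvDL msgs i).reverse.isEmpty = false := by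
      rw [List.isEmpty_eq_false_iff_exists_mem]
      obtain ⟨x, hx⟩ := List.exists_mem_of_length_pos (l := (pvDL msgs i).reverse) (by simpa using hkpos)
      exact ⟨x, hx⟩
    rw [hiem]
    simp only [Bool.false_eq_true, if_false]
    have hlen : (pvDL msgs i).reverse.length = (pvDL msgs i).length := List.length_reverse
    rw [hlen]
    have hidx : (max 0 (((pvDL msgs i).length : Int) - kg)).toNat
        = (pvDL msgs i).length - 1 - (min kg.toNat (pvDL msgs i).length - 1) := by
      omega
    rw [hidx, pvDL_getD_rev (pvDL msgs i) (min kg.toNat (pvDL msgs i).length - 1) (by omega)]
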